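-- pv_equiv track=rewrite | github.com/chenyaofo/CEMA | codebase/constant/__init__.py | get_imagenet_c_corruption_type
-- ===== SOURCE A (Python) =====
-- IMAGENET_C = dict(
--     noise=[
--         "gaussian_noise",
--         "shot_noise",
--         "impulse_noise",
--     ],
--
--     blur=[
--         "defocus_blur",
--         "glass_blur",
--         "motion_blur",
--         "zoom_blur",
--     ],
--
--     weather=[
--         "snow",
--         "frost",
--         "fog",
--         "brightness",
--     ],
--
--     digital=[
--         "contrast",
--         "elastic_transform",
--         "pixelate",
--         "jpeg_compression",
--     ]
-- )
--
-- def get_imagenet_c_corruption_type(hint: str):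
--     coarse_types = IMAGENET_C.keys()
--     fined_types = []
--     for k, v in IMAGENET_C.items():
--         fined_types += v
--     if hint in coarse_types:
--         return IMAGENET_C[hint]
--     elif hint in fined_types:
--         return [hint]
--     else:
--         raise ValueError(f"hint={hint} is not in coarse_types or fined_types of ImageNet-C")
-- ===== SOURCE B (Python) =====
-- IMAGENET_C = dict(
--     noise=[
--         "gaussian_noise",
--         "shot_noise",
--         "impulse_noise",
--     ],
--
--     blur=[
--         "defocus_blur",
--         "glass_blur",
--         "motion_blur",
--         "zoom_blur",
--     ],
--
--     weather=[
--         "snow",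
--         "frost",
--         "fog",
--         "brightness",
--     ],
--
--     digital=[
--         "contrast",
--         "elastic_transform",
--         "pixelate",
--         "jpeg_compression",
--     ]
-- )
--
-- def get_imagenet_c_corruption_type(hint: str):
--     for k, v in IMAGENET_C.items():
--         if hint == k:
--             return v
--         if hint in v:
--             return [hint]
--     raise ValueError(f"hint={hint} is not in coarse_types or fined_types of ImageNet-C")
-- ===== Notes on version B (the rewrite author's own statement) =====
-- stated objective: simpler
-- what changed: Replaces A's flattened fined_types accumulator plus two separate membership scans with a single short-circuiting pass over IMAGENET_C.items() that returns v on a key match or [hint] on a member match.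
import Mathlib
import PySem

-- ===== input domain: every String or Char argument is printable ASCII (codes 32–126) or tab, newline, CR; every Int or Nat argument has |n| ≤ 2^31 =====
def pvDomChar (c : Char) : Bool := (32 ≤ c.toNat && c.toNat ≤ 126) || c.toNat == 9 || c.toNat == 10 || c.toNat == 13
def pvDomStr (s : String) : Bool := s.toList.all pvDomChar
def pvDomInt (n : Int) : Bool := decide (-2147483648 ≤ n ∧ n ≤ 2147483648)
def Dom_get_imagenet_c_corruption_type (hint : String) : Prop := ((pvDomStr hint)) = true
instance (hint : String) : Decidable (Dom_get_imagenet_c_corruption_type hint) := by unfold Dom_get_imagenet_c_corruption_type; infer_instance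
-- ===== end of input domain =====

-- B replaces A's flatten-then-two-membership-scans with one short-circuiting pass over the items (objective: simpler).

def IMAGENET_C : PySem.Dict String (List String) := PySem.Dict.mk [
  ("noise", ["gaussian_noise", "shot_noise", "impulse_noise"]),
  ("blur", ["defocus_blur", "glass_blur", "motion_blur", "zoom_blur"]),
  ("weather", ["snow", "frost", "fog", "brightness"]),
  ("digital", ["contrast", "elastic_transform", "pixelate", "jpeg_compression"])]

-- ===== PORT A =====
def get_imagenet_c_corruption_type (hint : String) : List String :=
  let coarse_types := IMAGENET_C.keys
  let fined_types := IMAGENET_C.items.foldl (fun acc kv => acc ++ kv.2) []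
  if hint ∈ coarse_types then (IMAGENET_C.get? hint).getD []
  else if hint ∈ fined_types then [hint]
  else []  -- Python raises ValueError here; excluded by Pre_

-- ===== PORT B =====
def pyB_scan (hint : String) : List (String × List String) → List String
  | [] => []  -- Python raises ValueError here; excluded by Pre_
  | (k, v) :: rest => if hint == k then v else if hint ∈ v then [hint] else pyB_scan hint rest

def get_imagenet_c_corruption_type_alt (hint : String) : List String :=
  pyB_scan hint IMAGENET_C.items

-- ===== PRECONDITION & SPEC =====
-- Pre_: hint is a coarse category or a fine corruption name; on anything else A (and B) raise ValueError.
def Pre_get_imagenet_c_corruption_type (hint : String) : Prop :=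
  hint ∈ ["noise", "blur", "weather", "digital",
          "gaussian_noise", "shot_noise", "impulse_noise",
          "defocus_blur", "glass_blur", "motion_blur", "zoom_blur",
          "snow", "frost", "fog", "brightness",
          "contrast", "elastic_transform", "pixelate", "jpeg_compression"]
instance (hint : String) : Decidable (Pre_get_imagenet_c_corruption_type hint) := by unfold Pre_get_imagenet_c_corruption_type; infer_instance
def pvWitness_get_imagenet_c_corruption_type : String := "snow"

def Spec_get_imagenet_c_corruption_type (hint : String) (out : List String) : Prop := out = get_imagenet_c_corruption_type_alt hint
instance (hint : String) (out : List String) : Decidable (Spec_get_imagenet_c_corruption_type hint out) := by unfold Spec_get_imagenet_c_corruption_type; infer_instance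

-- ===== CLAIM (what is proved, stated in full; the proofs are below) =====
def Claim_equal_get_imagenet_c_corruption_type : Prop := ∀ (hint : String), Dom_get_imagenet_c_corruption_type hint → Pre_get_imagenet_c_corruption_type hint → Spec_get_imagenet_c_corruption_type hint (get_imagenet_c_corruption_type hint)

-- ===== LEMMAS AND PROOFS =====

-- ===== VERDICT (by name: the statement is the Claim_ definition above) =====
theorem get_imagenet_c_corruption_type_spec : Claim_equal_get_imagenet_c_corruption_type := by
  intro hint _ hpre
  unfold Pre_get_imagenet_c_corruption_type at hpre
  unfold Spec_get_imagenet_c_corruption_type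
  simp only [List.mem_cons, List.not_mem_nil, or_false] at hpre
  rcases hpre with rfl|rfl|rfl|rfl|rfl|rfl|rfl|rfl|rfl|rfl|rfl|rfl|rfl|rfl|rfl|rfl|rfl|rfl|rfl <;> decide
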